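-- pv_equiv track=rewrite | github.com/LactatingCorgi/MAF_hearts | main.py | calculate_point_value
-- ===== SOURCE A (Python) =====
-- def calculate_point_value(stack):
--     value = 0
--     for item in stack:
--         if item[0] == 'Spades':
--             value = value + 12
--         else:
--             value = value + 1
--
--     return value
-- ===== SOURCE B (Python) =====
-- def calculate_point_value(stack):
--     n = len(stack)
--     if n == 0:
--         return 0
--     if n == 1:
--         return 12 if stack[0][0] == 'Spades' else 1
--     mid = n // 2
--     return calculate_point_value(stack[:mid]) + calculate_point_value(stack[mid:])
-- ===== Notes on version B (the rewrite author's own statement) =====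
-- stated objective: alternative
-- what changed: Replaces the single left-to-right accumulator loop by divide-and-conquer: the stack is split in half, each half is scored recursively, and the two subtotals are added (correct because the score is a sum over items, hence associative over any split).
import Mathlib
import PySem

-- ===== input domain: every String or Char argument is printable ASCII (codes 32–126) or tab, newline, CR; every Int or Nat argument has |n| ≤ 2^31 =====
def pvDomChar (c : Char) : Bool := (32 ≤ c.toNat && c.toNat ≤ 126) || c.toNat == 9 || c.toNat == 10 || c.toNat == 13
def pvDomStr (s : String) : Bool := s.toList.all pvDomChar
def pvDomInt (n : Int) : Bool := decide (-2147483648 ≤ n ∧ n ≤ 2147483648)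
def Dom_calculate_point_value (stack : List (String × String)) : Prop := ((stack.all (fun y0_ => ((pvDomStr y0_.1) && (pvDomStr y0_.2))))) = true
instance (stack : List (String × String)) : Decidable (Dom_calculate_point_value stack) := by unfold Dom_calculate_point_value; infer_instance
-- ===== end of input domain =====

-- B replaces A's left-to-right accumulator loop by divide-and-conquer over the split stack (alternative decomposition; the score is a sum over items, so any split order gives the same total).


-- ===== PORT A =====
def calculate_point_value (stack : List (String × String)) : Int :=
  stack.foldl (fun value item => if item.1 == "Spades" then value + 12 else value + 1) 0

-- ===== PORT B =====
def calculate_point_value_alt (stack : List (String × String)) : Int :=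
  match stack with
  | [] => 0
  | [head] => if head.1 == "Spades" then 12 else 1
  | a :: b :: rest =>
    let mid := (a :: b :: rest).length / 2
    calculate_point_value_alt ((a :: b :: rest).take mid)
      + calculate_point_value_alt ((a :: b :: rest).drop mid)
termination_by stack.length
decreasing_by
  · simp only [List.length_take, List.length_cons]; omega
  · simp only [List.length_drop, List.length_cons]; omega

-- ===== PRECONDITION & SPEC =====
def Spec_calculate_point_value (stack : List (String × String)) (out : Int) : Prop := out = calculate_point_value_alt stack
instance (stack : List (String × String)) (out : Int) : Decidable (Spec_calculate_point_value stack out) := by unfold Spec_calculate_point_value; infer_instance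

-- ===== CLAIM (what is proved, stated in full; the proofs are below) =====
def Claim_equal_calculate_point_value : Prop := ∀ (stack : List (String × String)), Dom_calculate_point_value stack → Spec_calculate_point_value stack (calculate_point_value stack)

-- ===== LEMMAS AND PROOFS =====

-- The canonical score: the sum of the per-item scores.
def cpvScoreSum (stack : List (String × String)) : Int :=
  (stack.map (fun item => if item.1 == "Spades" then (12 : Int) else 1)).sum

-- A's loop invariant: the accumulator shifts the canonical score.
lemma cpv_foldl_shift (stack : List (String × String)) (v : Int) :
    stack.foldl (fun value item => if item.1 == "Spades" then value + 12 else value + 1) v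
      = v + cpvScoreSum stack := by
  induction stack generalizing v with
  | nil => simp [cpvScoreSum]
  | cons h t ih =>
    simp only [List.foldl_cons, cpvScoreSum, List.map_cons, List.sum_cons]
    rw [ih]
    by_cases hs : h.1 == "Spades" <;> simp [hs, cpvScoreSum] <;> ring

-- B's divide-and-conquer computes the canonical score (split-invariance of the sum).
lemma cpv_alt_eq_sum (stack : List (String × String)) :
    calculate_point_value_alt stack = cpvScoreSum stack := by
  induction stack using calculate_point_value_alt.induct with
  | case1 => simp [calculate_point_value_alt, cpvScoreSum]
  | case2 head h =>
    simp only [beq_iff_eq] at h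
    simp [calculate_point_value_alt, cpvScoreSum, h]
  | case3 head h =>
    simp only [beq_iff_eq] at h
    simp [calculate_point_value_alt, cpvScoreSum, h]
  | case4 a b rest mid ih1 ih2 =>
    rw [calculate_point_value_alt, ih1, ih2]
    simp only [cpvScoreSum, ← List.sum_append, ← List.map_append, List.take_append_drop]

-- ===== VERDICT (by name: the statement is the Claim_ definition above) =====
theorem calculate_point_value_spec : Claim_equal_calculate_point_value := by
  intro stack _
  unfold Spec_calculate_point_value calculate_point_value
  rw [cpv_alt_eq_sum]
  simpa using cpv_foldl_shift stack 0
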